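-- pv_equiv track=rewrite | github.com/hreinn91/adventofcode | year2020/day09/main.py | break_up_xmas
-- ===== SOURCE A (Python) =====
-- def break_up_xmas(xmas, limit):
--     xmas_break = []
--     holder = []
--     for i in xmas:
--         if i >= limit:
--             if holder:
--                 xmas_break.append(holder)
--             holder = []
--         else:
--             holder.append(i)
--     return xmas_break
-- ===== SOURCE B (Python) =====
-- def _skip(xmas, limit):
--     # drop leading separators (elements >= limit)
--     i = 0
--     while i < len(xmas) and xmas[i] >= limit:
--         i += 1
--     return xmas[i:]
--
-- def _span(xmas, limit):
--     # split off the maximal leading run of elements below limit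
--     j = 0
--     while j < len(xmas) and xmas[j] < limit:
--         j += 1
--     return xmas[:j], xmas[j:]
--
-- def break_up_xmas(xmas, limit):
--     rest = _skip(xmas, limit)
--     run, rest = _span(rest, limit)
--     if not rest:
--         # the trailing run is never flushed (no separator follows it)
--         return []
--     return [run] + break_up_xmas(rest[1:], limit)
-- ===== Notes on version B (the rewrite author's own statement) =====
-- stated objective: alternative
-- what changed: B recurses run-at-a-time (skip separators, span off one maximal below-limit run, emit it only if a separator follows) instead of A's single element-by-element fold with a holder accumulator.
import Mathlib
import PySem

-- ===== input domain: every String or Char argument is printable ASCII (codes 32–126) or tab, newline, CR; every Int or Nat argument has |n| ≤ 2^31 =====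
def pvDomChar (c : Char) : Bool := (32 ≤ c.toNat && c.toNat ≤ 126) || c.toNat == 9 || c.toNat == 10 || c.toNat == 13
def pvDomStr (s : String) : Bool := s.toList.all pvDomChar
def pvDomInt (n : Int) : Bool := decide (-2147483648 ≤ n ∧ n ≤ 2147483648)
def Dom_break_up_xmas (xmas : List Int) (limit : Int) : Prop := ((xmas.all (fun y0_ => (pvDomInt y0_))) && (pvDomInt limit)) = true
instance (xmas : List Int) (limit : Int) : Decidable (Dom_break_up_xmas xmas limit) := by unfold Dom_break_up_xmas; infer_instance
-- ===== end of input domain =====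

-- B replaces A's element-by-element fold over a holder accumulator by a run-at-a-time
-- recursion (skip separators, span off one maximal run, emit it only if a separator follows);
-- objective: alternative decomposition, same O(n) cost.

-- ===== PORT A =====
def break_up_xmas (xmas : List Int) (limit : Int) : List (List Int) :=
  (xmas.foldl
    (fun (st : List (List Int) × List Int) i =>
      if i ≥ limit then
        (if st.2 ≠ [] then st.1 ++ [st.2] else st.1, [])
      else
        (st.1, st.2 ++ [i]))
    ([], [])).1

-- ===== PORT B =====
-- first while loop of Source B: drop leading elements ≥ limit
def pvSkip (limit : Int) : List Int → List Int
  | [] => []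
  | x :: xs => if x ≥ limit then pvSkip limit xs else x :: xs

-- second while loop of Source B: split off the maximal leading run of elements < limit
def pvSpan (limit : Int) : List Int → List Int × List Int
  | [] => ([], [])
  | x :: xs =>
    if x < limit then
      let p := pvSpan limit xs
      (x :: p.1, p.2)
    else ([], x :: xs)

theorem pvSkip_len_le (limit : Int) : ∀ l : List Int, (pvSkip limit l).length ≤ l.length := by
  intro l
  induction l with
  | nil => simp [pvSkip]
  | cons x xs ih => simp only [pvSkip]; split <;> simp; omega

theorem pvSpan_len_le (limit : Int) : ∀ l : List Int, (pvSpan limit l).2.length ≤ l.length := by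
  intro l
  induction l with
  | nil => simp [pvSpan]
  | cons x xs ih => simp only [pvSpan]; split <;> simp; omega

def break_up_xmas_alt (xmas : List Int) (limit : Int) : List (List Int) :=
  let rest := pvSkip limit xmas
  let p := pvSpan limit rest
  match h : p.2 with
  | [] => []
  | _ :: tl => p.1 :: break_up_xmas_alt tl limit
termination_by xmas.length
decreasing_by
  have h1 := pvSkip_len_le limit xmas
  have h2 := pvSpan_len_le limit (pvSkip limit xmas)
  rw [h] at h2
  simp at h2
  omega

-- ===== PRECONDITION & SPEC =====
def Spec_break_up_xmas (xmas : List Int) (limit : Int) (out : List (List Int)) : Prop := out = break_up_xmas_alt xmas limit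
instance (xmas : List Int) (limit : Int) (out : List (List Int)) : Decidable (Spec_break_up_xmas xmas limit out) := by unfold Spec_break_up_xmas; infer_instance

-- ===== CLAIM (what is proved, stated in full; the proofs are below) =====
def Claim_equal_break_up_xmas : Prop := ∀ (xmas : List Int) (limit : Int), Dom_break_up_xmas xmas limit → Spec_break_up_xmas xmas limit (break_up_xmas xmas limit)

-- ===== LEMMAS AND PROOFS =====

def stepA (limit : Int) (st : List (List Int) × List Int) (i : Int) : List (List Int) × List Int :=
  if i ≥ limit then
    (if st.2 ≠ [] then st.1 ++ [st.2] else st.1, [])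
  else
    (st.1, st.2 ++ [i])

theorem break_up_xmas_eq (xmas : List Int) (limit : Int) :
    break_up_xmas xmas limit = (xmas.foldl (stepA limit) ([], [])).1 := rfl

theorem alt_eq (xmas : List Int) (limit : Int) :
    break_up_xmas_alt xmas limit =
      match (pvSpan limit (pvSkip limit xmas)).2 with
      | [] => []
      | _ :: tl => (pvSpan limit (pvSkip limit xmas)).1 :: break_up_xmas_alt tl limit := by
  rw [break_up_xmas_alt.eq_def]
  dsimp only
  split <;> split <;> simp_all

theorem pvSpan_all_lt (limit : Int) (l : List Int) (h : ∀ x ∈ l, x < limit) :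
    pvSpan limit l = (l, []) := by
  induction l with
  | nil => simp [pvSpan]
  | cons x xs ih =>
    have hx : x < limit := h x (by simp)
    simp [pvSpan, hx, ih (fun y hy => h y (by simp [hy]))]

theorem pvSpan_append_sep (limit : Int) (l : List Int) (x : Int) (r : List Int)
    (hl : ∀ y ∈ l, y < limit) (hx : ¬ x < limit) :
    pvSpan limit (l ++ x :: r) = (l, x :: r) := by
  induction l with
  | nil => simp [pvSpan, hx]
  | cons a as ih =>
    have ha : a < limit := hl a (by simp)
    simp [pvSpan, ha, ih (fun y hy => hl y (by simp [hy]))]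

theorem pvSkip_lt (limit : Int) (x : Int) (xs : List Int) (hx : x < limit) :
    pvSkip limit (x :: xs) = x :: xs := by
  simp [pvSkip]; omega

-- alt on a list consisting entirely of elements < limit: the trailing run is dropped
theorem alt_all_lt (limit : Int) (l : List Int) (h : ∀ x ∈ l, x < limit) :
    break_up_xmas_alt l limit = [] := by
  have hskip : pvSkip limit l = l := by
    cases l with
    | nil => simp [pvSkip]
    | cons a as => exact pvSkip_lt limit a as (h a (by simp))
  rw [alt_eq]
  simp [hskip, pvSpan_all_lt limit l h]

-- alt ignores a leading separator
theorem alt_cons_ge (limit : Int) (x : Int) (xs : List Int) (hx : x ≥ limit) :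
    break_up_xmas_alt (x :: xs) limit = break_up_xmas_alt xs limit := by
  conv_lhs => rw [alt_eq]
  conv_rhs => rw [alt_eq]
  simp [pvSkip, hx]

-- alt flushes a nonempty run followed by a separator
theorem alt_run_sep (limit : Int) (h : Int) (hs : List Int) (x : Int) (xs : List Int)
    (hrun : ∀ y ∈ h :: hs, y < limit) (hx : x ≥ limit) :
    break_up_xmas_alt ((h :: hs) ++ x :: xs) limit = (h :: hs) :: break_up_xmas_alt xs limit := by
  rw [alt_eq]
  have hh : h < limit := hrun h (by simp)
  have hskip : pvSkip limit ((h :: hs) ++ x :: xs) = (h :: hs) ++ x :: xs := by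
    simp [pvSkip]; omega
  have hspan := pvSpan_append_sep limit (h :: hs) x xs hrun (by omega)
  rw [hskip, hspan]

theorem foldA_alt (limit : Int) :
    ∀ (xs holder : List Int) (acc : List (List Int)), (∀ h ∈ holder, h < limit) →
      (xs.foldl (stepA limit) (acc, holder)).1 = acc ++ break_up_xmas_alt (holder ++ xs) limit := by
  intro xs
  induction xs with
  | nil =>
    intro holder acc hh
    simp [alt_all_lt limit holder hh]
  | cons x xs ih =>
    intro holder acc hh
    by_cases hx : x ≥ limit
    · cases holder with
      | nil =>
        have : stepA limit (acc, []) x = (acc, []) := by simp [stepA, hx]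
        rw [List.foldl_cons, this, ih [] acc (by simp)]
        simp [alt_cons_ge limit x xs hx]
      | cons h hs =>
        have : stepA limit (acc, h :: hs) x = (acc ++ [h :: hs], []) := by
          simp [stepA, hx]
        rw [List.foldl_cons, this, ih [] (acc ++ [h :: hs]) (by simp)]
        rw [alt_run_sep limit h hs x xs hh hx]
        simp
    · have : stepA limit (acc, holder) x = (acc, holder ++ [x]) := by
        simp [stepA, hx]
      have hall : ∀ y ∈ holder ++ [x], y < limit := by
        intro y hy
        rcases List.mem_append.1 hy with h1 | h1
        · exact hh y h1
        · simp at h1; omega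
      rw [List.foldl_cons, this, ih (holder ++ [x]) acc hall]
      simp [List.append_assoc]

-- ===== VERDICT (by name: the statement is the Claim_ definition above) =====
theorem break_up_xmas_spec : Claim_equal_break_up_xmas := by
  intro xmas limit _
  unfold Spec_break_up_xmas
  rw [break_up_xmas_eq]
  have := foldA_alt limit xmas [] [] (by simp)
  simpa using this
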